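-- pv_equiv track=rewrite | github.com/exploratorystudios/mtg-deck-generator | deck_generator_commander.py | _expand_strategy_keyword
-- ===== SOURCE A (Python) =====
-- STRATEGY_KEYWORD_EXPANSIONS: dict[str, list[str]] = {
--     "go_wide": ["tokens", "anthem"],
--     "aristocrats": ["sacrifice", "death_trigger", "drain"],
--     "voltron": ["equipment", "auras", "voltron_enabler", "keyword_grant"],
--     "tempo": ["tempo", "evasion", "interaction"],
--     "stax": ["stax", "interaction"],
--     "group_slug": ["group_slug", "drain", "damage"],
--     "interaction": ["removal", "counter", "bounce", "discard"],
--     "protection": ["protection", "hexproof", "ward"],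
--     "card_advantage": ["draw", "tutor"],
--     "mana_advantage": ["ramp"],
--     "tempo_advantage": ["tempo", "evasion"],
--     "equipment": ["equipment", "voltron_enabler"],
--     "auras": ["auras", "voltron_enabler"],
--     "lords": ["lords", "anthem", "tribal"],
-- }
--
-- def _expand_strategy_keyword(word: str, seen: set[str] | None = None) -> list[str]:
--     seen = seen or set()
--     wl = word.lower().strip()
--     if not wl or wl in seen:
--         return []
--     seen.add(wl)
--     expanded = [wl]
--     for child in STRATEGY_KEYWORD_EXPANSIONS.get(wl, []):
--         expanded.extend(_expand_strategy_keyword(child, seen))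
--     return expanded
-- ===== SOURCE B (Python) =====
-- STRATEGY_KEYWORD_EXPANSIONS: dict[str, list[str]] = {
--     "go_wide": ["tokens", "anthem"],
--     "aristocrats": ["sacrifice", "death_trigger", "drain"],
--     "voltron": ["equipment", "auras", "voltron_enabler", "keyword_grant"],
--     "tempo": ["tempo", "evasion", "interaction"],
--     "stax": ["stax", "interaction"],
--     "group_slug": ["group_slug", "drain", "damage"],
--     "interaction": ["removal", "counter", "bounce", "discard"],
--     "protection": ["protection", "hexproof", "ward"],
--     "card_advantage": ["draw", "tutor"],
--     "mana_advantage": ["ramp"],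
--     "tempo_advantage": ["tempo", "evasion"],
--     "equipment": ["equipment", "voltron_enabler"],
--     "auras": ["auras", "voltron_enabler"],
--     "lords": ["lords", "anthem", "tribal"],
-- }
--
--
-- def _expand_strategy_keyword(word: str, seen: set[str] | None = None) -> list[str]:
--     # Iterative DFS with an explicit stack instead of recursion.
--     seen = seen or set()
--     result: list[str] = []
--     stack = [word]
--     while stack:
--         node = stack.pop()
--         wl = node.lower().strip()
--         if not wl or wl in seen:
--             continue
--         seen.add(wl)
--         result.append(wl)
--         stack.extend(reversed(STRATEGY_KEYWORD_EXPANSIONS.get(wl, [])))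
--     return result
-- ===== Notes on version B (the rewrite author's own statement) =====
-- stated objective: alternative
-- what changed: Replaced A's recursive expansion (recursion per keyword plus a for-loop over children) by a single iterative DFS loop with an explicit stack, pushing children in reversed order and testing `seen` on pop, which reproduces the same preorder and cycle dedup without recursion.
import Mathlib
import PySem

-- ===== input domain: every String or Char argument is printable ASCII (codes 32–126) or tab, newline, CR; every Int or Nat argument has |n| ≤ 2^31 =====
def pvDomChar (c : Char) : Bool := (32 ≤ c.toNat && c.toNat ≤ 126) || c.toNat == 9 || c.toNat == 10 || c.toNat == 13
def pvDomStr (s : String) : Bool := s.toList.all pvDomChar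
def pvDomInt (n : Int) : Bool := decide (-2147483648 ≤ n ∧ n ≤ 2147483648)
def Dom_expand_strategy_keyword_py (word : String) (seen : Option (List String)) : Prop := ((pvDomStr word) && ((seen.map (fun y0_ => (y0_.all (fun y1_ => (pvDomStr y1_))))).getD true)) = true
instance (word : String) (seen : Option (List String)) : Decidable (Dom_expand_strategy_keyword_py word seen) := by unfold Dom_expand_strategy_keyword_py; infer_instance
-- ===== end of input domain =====

-- B replaces A's recursion by an explicit stack-based DFS loop (same preorder, same dedup).
-- Equivalence is about the RETURN value; both Pythons also mutate the caller's `seen` set identically.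

-- the module constant STRATEGY_KEYWORD_EXPANSIONS, shared verbatim by both programs
def pvKeyPairs : List (String × List String) :=
  [("go_wide", ["tokens", "anthem"]),
   ("aristocrats", ["sacrifice", "death_trigger", "drain"]),
   ("voltron", ["equipment", "auras", "voltron_enabler", "keyword_grant"]),
   ("tempo", ["tempo", "evasion", "interaction"]),
   ("stax", ["stax", "interaction"]),
   ("group_slug", ["group_slug", "drain", "damage"]),
   ("interaction", ["removal", "counter", "bounce", "discard"]),
   ("protection", ["protection", "hexproof", "ward"]),
   ("card_advantage", ["draw", "tutor"]),
   ("mana_advantage", ["ramp"]),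
   ("tempo_advantage", ["tempo", "evasion"]),
   ("equipment", ["equipment", "voltron_enabler"]),
   ("auras", ["auras", "voltron_enabler"]),
   ("lords", ["lords", "anthem", "tribal"])]

def pvKeys : PySem.Dict String (List String) := PySem.Dict.mk pvKeyPairs

-- word.lower().strip()
def pvNorm (w : String) : String := PySem.Str.strip (PySem.Str.lower w)

-- ===== PORT A =====
-- A's recursion, transliterated; the fuel argument only makes the same computation total
-- (16 exceeds the number of dict keys, which bounds the recursion depth, so fuel is never exhausted).
mutual
def expandAFuel : Nat → String → List String → List String × List String
  | 0, _, seen => ([], seen)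
  | fuel + 1, word, seen =>
    let wl := pvNorm word
    if wl = "" ∨ seen.contains wl then ([], seen)
    else
      let seen1 := PySem.Set.add seen wl
      let r := expandAList fuel (PySem.Dict.getD pvKeys wl []) seen1
      (wl :: r.1, r.2)
termination_by fuel _ _ => (fuel, 0)

-- the `for child in …: expanded.extend(_expand_strategy_keyword(child, seen))` loop
def expandAList : Nat → List String → List String → List String × List String
  | _, [], seen => ([], seen)
  | fuel, c :: cs, seen =>
    let r1 := expandAFuel fuel c seen
    let r2 := expandAList fuel cs r1.2
    (r1.1 ++ r2.1, r2.2)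
termination_by fuel cs _ => (fuel, cs.length + 1)
end

def expand_strategy_keyword_py (word : String) (seen : Option (List String)) : List String :=
  (expandAFuel 16 word (seen.getD [])).1

-- ===== PORT B =====
-- termination measure for the DFS loop: number of dict keys not yet in `seen`
def pvM (seen : List String) : Nat :=
  (pvKeyPairs.filter (fun kv => !seen.contains kv.1)).length

theorem pvFilterLenLe {α : Type} (l : List α) (p q : α → Bool)
    (h : ∀ x, p x = true → q x = true) : (l.filter p).length ≤ (l.filter q).length := by
  induction l with
  | nil => simp
  | cons a t ih =>
    simp only [List.filter_cons]
    by_cases hp : p a = true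
    · rw [if_pos hp, if_pos (h a hp)]; simpa using ih
    · rw [if_neg hp]
      by_cases hq : q a = true
      · rw [if_pos hq]; simp; omega
      · rw [if_neg hq]; exact ih

theorem pvMemAdd (s : List String) (w x : String) (hx : x ∈ s) : x ∈ PySem.Set.add s w := by
  simp only [PySem.Set.add]; split <;> simp_all

theorem pvM_mono (s t : List String) (hsub : ∀ x, x ∈ s → x ∈ t) : pvM t ≤ pvM s := by
  apply pvFilterLenLe
  intro kv h
  simp only [Bool.not_eq_eq_eq_not, Bool.not_true, List.contains_eq_mem,
    decide_eq_false_iff_not] at h ⊢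
  exact fun hc => h (hsub _ hc)

theorem pvM_add_le (s : List String) (w : String) : pvM (PySem.Set.add s w) ≤ pvM s :=
  pvM_mono s (PySem.Set.add s w) (pvMemAdd s w)

theorem pvM_add_lt (s : List String) (w : String)
    (hmem : w ∈ pvKeyPairs.map Prod.fst) (hni : s.contains w = false) :
    pvM (PySem.Set.add s w) < pvM s := by
  have hws : w ∉ s := by simpa [List.contains_eq_mem] using hni
  have hadd : PySem.Set.add s w = s ++ [w] := by
    simp [PySem.Set.add, List.contains_eq_mem, hws]
  unfold pvM
  rw [hadd]
  have key : ∀ (l : List (String × List String)), w ∈ l.map Prod.fst →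
      (l.filter (fun kv => !(s ++ [w]).contains kv.1)).length <
      (l.filter (fun kv => !s.contains kv.1)).length := by
    intro l
    induction l with
    | nil => simp
    | cons a t ih =>
      intro hm
      simp only [List.map_cons, List.mem_cons] at hm
      simp only [List.filter_cons]
      by_cases haw : a.1 = w
      · have h1 : (!(s ++ [w]).contains a.1) = false := by
          simp [List.contains_eq_mem, haw]
        have h2 : (!s.contains a.1) = true := by
          simp [List.contains_eq_mem, haw, hws]
        rw [if_neg (by simp only [h1]; exact Bool.false_ne_true), if_pos h2]
        have hle := pvFilterLenLe t (fun kv => !(s ++ [w]).contains kv.1)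
          (fun kv => !s.contains kv.1) ?_
        · simp only [List.length_cons]; omega
        · intro kv hkv
          simp only [Bool.not_eq_eq_eq_not, Bool.not_true, List.contains_eq_mem,
            decide_eq_false_iff_not, List.mem_append] at hkv ⊢
          exact fun hc => hkv (Or.inl hc)
      · have hm' : w ∈ t.map Prod.fst := by tauto
        have hc : ((s ++ [w]).contains a.1) = (s.contains a.1) := by
          simp [List.contains_eq_mem, haw]
        rw [hc]
        by_cases hca : (!s.contains a.1) = true
        · rw [if_pos hca, if_pos hca]
          simp only [List.length_cons]
          exact Nat.succ_lt_succ (ih hm')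
        · rw [if_neg hca, if_neg hca]
          exact ih hm'
  exact key pvKeyPairs hmem

theorem pvNotKey_getD (w : String) (hw : w ∉ pvKeyPairs.map Prod.fst) :
    PySem.Dict.getD pvKeys w [] = [] := by
  apply PySem.Dict.getD_of_not_contains
  rw [PySem.Dict.contains_eq_decide_mem_keys]
  simpa [pvKeys] using hw

-- the while-loop of B: stack (head = top of stack), seen, result
def loopB : List String → List String → List String → List String
  | [], _, result => result
  | node :: rest, seen, result =>
    let wl := pvNorm node
    if wl = "" ∨ seen.contains wl then loopB rest seen result
    else loopB (PySem.Dict.getD pvKeys wl [] ++ rest) (PySem.Set.add seen wl) (result ++ [wl])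
termination_by stack seen _ => (pvM seen, stack.length)
decreasing_by
  · exact Prod.Lex.right _ (by simp)
  · rename_i hg
    by_cases hk : wl ∈ pvKeyPairs.map Prod.fst
    · refine Prod.Lex.left _ _ (pvM_add_lt seen wl hk ?_)
      simp only [not_or] at hg
      exact Bool.not_eq_true _ ▸ (by simpa using hg.2)
    · rw [pvNotKey_getD wl hk]
      rcases Nat.lt_or_eq_of_le (pvM_add_le seen wl) with hlt | heq
      · exact Prod.Lex.left _ _ hlt
      · rw [heq]; exact Prod.Lex.right _ (by simp)

def expand_strategy_keyword_py_alt (word : String) (seen : Option (List String)) : List String :=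
  loopB [word] (seen.getD []) []

-- ===== PRECONDITION & SPEC =====
def Spec_expand_strategy_keyword_py (word : String) (seen : Option (List String)) (out : List String) : Prop := out = expand_strategy_keyword_py_alt word seen
instance (word : String) (seen : Option (List String)) (out : List String) : Decidable (Spec_expand_strategy_keyword_py word seen out) := by unfold Spec_expand_strategy_keyword_py; infer_instance

-- ===== CLAIM (what is proved, stated in full; the proofs are below) =====
def Claim_equal_expand_strategy_keyword_py : Prop := ∀ (word : String) (seen : Option (List String)), Dom_expand_strategy_keyword_py word seen → Spec_expand_strategy_keyword_py word seen (expand_strategy_keyword_py word seen)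

-- ===== LEMMAS AND PROOFS =====

-- A's recursion only ever grows `seen`
mutual
theorem pvSubFuel (fuel : Nat) (w : String) (s : List String) :
    ∀ x, x ∈ s → x ∈ (expandAFuel fuel w s).2 := by
  match fuel with
  | 0 => intro x hx; rw [expandAFuel]; exact hx
  | f + 1 =>
    intro x hx
    rw [expandAFuel]
    by_cases hg : pvNorm w = "" ∨ s.contains (pvNorm w)
    · rw [if_pos hg]; exact hx
    · rw [if_neg hg]
      exact pvSubList f _ _ x (pvMemAdd s (pvNorm w) x hx)
termination_by (fuel, 0)

theorem pvSubList (fuel : Nat) (cs : List String) (s : List String) :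
    ∀ x, x ∈ s → x ∈ (expandAList fuel cs s).2 := by
  match cs with
  | [] => intro x hx; rw [expandAList]; exact hx
  | c :: cs' =>
    intro x hx
    rw [expandAList]
    exact pvSubList fuel cs' _ x (pvSubFuel fuel c s x hx)
termination_by (fuel, cs.length + 1)
end

theorem pvM_list_le (fuel : Nat) (cs : List String) (s : List String) :
    pvM (expandAList fuel cs s).2 ≤ pvM s :=
  pvM_mono s _ (pvSubList fuel cs s)

-- main invariant: B's loop, run on `cs ++ ys`, first produces exactly what A's child loop
-- `expandAList` produces on `cs`, then continues with `ys` from the updated `seen`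
theorem pvMain (fuel : Nat) (cs ys s res : List String) (h : pvM s < fuel) :
    loopB (cs ++ ys) s res
      = loopB ys (expandAList fuel cs s).2 (res ++ (expandAList fuel cs s).1) := by
  match cs, fuel with
  | [], fuel => simp [expandAList]
  | c :: cs', 0 => omega
  | c :: cs', f + 1 =>
    rw [List.cons_append, loopB]
    by_cases hg : pvNorm c = "" ∨ s.contains (pvNorm c)
    · rw [if_pos hg, pvMain (f + 1) cs' ys s res h, expandAList, expandAFuel, if_pos hg]
      rfl
    · rw [if_neg hg]
      have hni : s.contains (pvNorm c) = false := by
        simp only [not_or] at hg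
        exact Bool.not_eq_true _ ▸ (by simpa using hg.2)
      by_cases hch : PySem.Dict.getD pvKeys (pvNorm c) [] = []
      · have h' : pvM (PySem.Set.add s (pvNorm c)) < f + 1 :=
          Nat.lt_of_le_of_lt (pvM_add_le s (pvNorm c)) h
        rw [hch, List.nil_append,
          pvMain (f + 1) cs' ys (PySem.Set.add s (pvNorm c)) (res ++ [pvNorm c]) h',
          expandAList, expandAFuel, if_neg hg, hch]
        simp [expandAList, List.append_assoc]
      · have hkey : pvNorm c ∈ pvKeyPairs.map Prod.fst := by
          by_contra hk; exact hch (pvNotKey_getD (pvNorm c) hk)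
        have hlt : pvM (PySem.Set.add s (pvNorm c)) < pvM s := pvM_add_lt s (pvNorm c) hkey hni
        have h1 : pvM (PySem.Set.add s (pvNorm c)) < f := by omega
        rw [pvMain f (PySem.Dict.getD pvKeys (pvNorm c) []) (cs' ++ ys)
            (PySem.Set.add s (pvNorm c)) (res ++ [pvNorm c]) h1]
        have h2 : pvM (expandAList f (PySem.Dict.getD pvKeys (pvNorm c) [])
            (PySem.Set.add s (pvNorm c))).2 < f + 1 := by
          have := pvM_list_le f (PySem.Dict.getD pvKeys (pvNorm c) [])
            (PySem.Set.add s (pvNorm c))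
          omega
        rw [pvMain (f + 1) cs' ys _ _ h2, expandAList, expandAFuel, if_neg hg]
        simp
termination_by (pvM s, cs.length)
decreasing_by
  · exact Prod.Lex.right _ (by simp)
  · rcases Nat.lt_or_eq_of_le (pvM_add_le s (pvNorm c)) with hlt | heq
    · exact Prod.Lex.left _ _ hlt
    · rw [heq]; exact Prod.Lex.right _ (by simp)
  · exact Prod.Lex.left _ _ hlt
  · exact Prod.Lex.left _ _ (by
      have := pvM_list_le f (PySem.Dict.getD pvKeys (pvNorm c) []) (PySem.Set.add s (pvNorm c))
      omega)

theorem pvM_le_14 (s : List String) : pvM s < 16 := by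
  have h1 := List.length_filter_le (fun kv => !s.contains kv.1) pvKeyPairs
  have h2 : pvKeyPairs.length = 14 := by rfl
  unfold pvM
  omega

-- ===== VERDICT (by name: the statement is the Claim_ definition above) =====
theorem expand_strategy_keyword_py_spec : Claim_equal_expand_strategy_keyword_py := by
  intro word seen _
  unfold Spec_expand_strategy_keyword_py expand_strategy_keyword_py expand_strategy_keyword_py_alt
  have h := pvMain 16 [word] [] (seen.getD []) [] (pvM_le_14 _)
  simp only [List.append_nil, List.nil_append] at h
  rw [h, loopB]
  simp [expandAList]
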